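-- pv_equiv track=rewrite | github.com/charlielang02/gitlab_stats | gitlab_stats/dashboard_utils/sections.py | _compute_streaks
-- ===== SOURCE A (Python) =====
-- def _compute_streaks(activity_series):
--     """Compute current and longest active-day streaks from daily totals."""
--     current_streak = 0
--     longest_streak = 0
--     running = 0
--
--     for is_active in activity_series:
--         if bool(is_active):
--             running += 1
--             longest_streak = max(longest_streak, running)
--         else:
--             running = 0
--
--     for is_active in reversed(list(activity_series)):
--         if bool(is_active):
--             current_streak += 1
--         else:
--             break
--
--     return current_streak, longest_streak
-- ===== SOURCE B (Python) =====
-- def _compute_streaks(activity_series):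
--     """Compute current and longest active-day streaks from daily totals."""
--     running = 0
--     longest = 0
--     for is_active in activity_series:
--         if bool(is_active):
--             running += 1
--             if running > longest:
--                 longest = running
--         else:
--             running = 0
--     # at the end of the single pass, `running` is exactly the trailing streak
--     return running, longest
-- ===== Notes on version B (the rewrite author's own statement) =====
-- stated objective: simpler
-- what changed: B makes a single forward pass: the forward running counter already equals the trailing (current) streak, so A's second reversed pass (and its list copy) is dropped.
import Mathlib
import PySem

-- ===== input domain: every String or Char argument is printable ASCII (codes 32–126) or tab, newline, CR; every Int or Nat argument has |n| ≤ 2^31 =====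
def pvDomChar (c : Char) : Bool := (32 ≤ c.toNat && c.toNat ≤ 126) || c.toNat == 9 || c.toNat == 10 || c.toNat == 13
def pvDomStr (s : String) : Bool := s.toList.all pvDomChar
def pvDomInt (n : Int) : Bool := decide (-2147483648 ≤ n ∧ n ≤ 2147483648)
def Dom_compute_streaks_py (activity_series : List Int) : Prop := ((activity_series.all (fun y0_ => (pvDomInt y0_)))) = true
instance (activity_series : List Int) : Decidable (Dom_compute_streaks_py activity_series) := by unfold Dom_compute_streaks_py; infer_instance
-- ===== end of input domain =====

-- B folds the list once: the forward running counter already equals the trailing streak,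
-- so A's second (reversed) pass is dropped. Proved equal on all inputs (both are total).

-- ===== PORT A =====
-- first loop of A: state (longest_streak, running)
def pvAStep (s : Int × Int) (x : Int) : Int × Int :=
  if x ≠ 0 then (max s.1 (s.2 + 1), s.2 + 1) else (s.1, 0)

-- second loop of A: walk reversed(list), incrementing current_streak, break on inactive
def pvATrail : List Int → Int → Int
  | [], c => c
  | x :: xs, c => if x ≠ 0 then pvATrail xs (c + 1) else c

def compute_streaks_py (activity_series : List Int) : Int × Int :=
  let s := activity_series.foldl pvAStep (0, 0)
  (pvATrail activity_series.reverse 0, s.1)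

-- ===== PORT B =====
-- single pass: state (running, longest)
def pvBStep (s : Int × Int) (x : Int) : Int × Int :=
  if x ≠ 0 then (s.1 + 1, if s.1 + 1 > s.2 then s.1 + 1 else s.2) else (0, s.2)

def compute_streaks_py_alt (activity_series : List Int) : Int × Int :=
  activity_series.foldl pvBStep (0, 0)

-- ===== PRECONDITION & SPEC =====
def Spec_compute_streaks_py (activity_series : List Int) (out : Int × Int) : Prop := out = compute_streaks_py_alt activity_series
instance (activity_series : List Int) (out : Int × Int) : Decidable (Spec_compute_streaks_py activity_series out) := by unfold Spec_compute_streaks_py; infer_instance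

-- ===== CLAIM (what is proved, stated in full; the proofs are below) =====
def Claim_equal_compute_streaks_py : Prop := ∀ (activity_series : List Int), Dom_compute_streaks_py activity_series → Spec_compute_streaks_py activity_series (compute_streaks_py activity_series)

-- ===== LEMMAS AND PROOFS =====

-- A's fold and B's fold carry the same state with components swapped
theorem pvFold_swap (xs : List Int) (l r : Int) :
    xs.foldl pvAStep (l, r) = ((xs.foldl pvBStep (r, l)).2, (xs.foldl pvBStep (r, l)).1) := by
  induction xs generalizing l r with
  | nil => rfl
  | cons x xs ih =>
    simp only [List.foldl_cons, pvAStep, pvBStep]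
    by_cases h : x ≠ 0
    · simp only [if_pos h]
      have hm : max l (r + 1) = (if r + 1 > l then r + 1 else l) := by
        split_ifs <;> omega
      rw [hm, ih]
    · simp only [if_neg h]; rw [ih]

-- the break-loop accumulator only offsets the result
theorem pvATrail_acc (xs : List Int) (c : Int) : pvATrail xs c = c + pvATrail xs 0 := by
  induction xs generalizing c with
  | nil => simp [pvATrail]
  | cons x xs ih =>
    simp only [pvATrail]
    by_cases h : x ≠ 0
    · simp only [if_pos h]; rw [ih (c + 1), ih (0 + 1)]; ring
    · simp [h]

-- the forward running counter equals the trailing-streak count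
theorem pvRunning_eq_trail (xs : List Int) (l : Int) :
    (xs.foldl pvBStep (0, l)).1 = pvATrail xs.reverse 0 := by
  induction xs using List.reverseRecOn generalizing l with
  | nil => rfl
  | append_singleton xs x ih =>
    rw [List.foldl_append, List.reverse_append]
    simp only [List.foldl_cons, List.foldl_nil, List.reverse_cons, List.reverse_nil,
      List.nil_append, List.singleton_append, pvATrail, pvBStep]
    by_cases h : x ≠ 0
    · simp only [if_pos h]
      rw [ih l, pvATrail_acc xs.reverse (0 + 1)]
      omega
    · simp [h]

-- ===== VERDICT (by name: the statement is the Claim_ definition above) =====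
theorem compute_streaks_py_spec : Claim_equal_compute_streaks_py := by
  intro xs _
  unfold Spec_compute_streaks_py compute_streaks_py compute_streaks_py_alt
  rw [pvFold_swap, ← pvRunning_eq_trail xs 0]
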